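-- pv_equiv track=rewrite | github.com/zachary-britt/capstone | src/formatter.py | gp_clean_text
-- ===== SOURCE A (Python) =====
-- def kill_from_line(text, keyword):
--     ''' Look for keyword in text, if so, reverse search from keyword to newline,
--         end the text before the newline'''
--
--     i = text.find(keyword)
--     if i != -1:
--         j = text[:i].rfind('\n')
--         if j!=-1:
--             return text[:j]
--         else:
--             return ''
--     else:
--         return text
--
-- def gp_clean_text(text):
--     #TODO
--     ''' Clean gateway pundit text '''
--
--     kill_from_args = [  'UPDATE: ',
--                         'Read the whole thing here.',
--                         'Photo image via',
--                         'H/T:'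
--                         ]
--
--     for kill_from_arg in kill_from_args:
--         kill_args = [text, kill_from_arg]
--         text = kill_from_line(*kill_args)
--
--
--     text = text.replace('Gateway Pundit', 'this newspaper')
--
--     return text
-- ===== SOURCE B (Python) =====
-- def gp_clean_text(text):
--     ''' Clean gateway pundit text '''
--     for kw in ['UPDATE: ', 'Read the whole thing here.', 'Photo image via', 'H/T:']:
--         lines = text.split('\n')
--         for k, line in enumerate(lines):
--             if kw in line:
--                 text = '\n'.join(lines[:k])
--                 break
--     return text.replace('Gateway Pundit', 'this newspaper')
-- ===== Notes on version B (the rewrite author's own statement) =====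
-- stated objective: simpler
-- what changed: kill_from_line's find/rfind index arithmetic is replaced by a line-level scan: split the text into its lines, keep the lines before the first line containing the keyword, and join them back; the four-keyword loop and the final phrase replacement stay.
import Mathlib
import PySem

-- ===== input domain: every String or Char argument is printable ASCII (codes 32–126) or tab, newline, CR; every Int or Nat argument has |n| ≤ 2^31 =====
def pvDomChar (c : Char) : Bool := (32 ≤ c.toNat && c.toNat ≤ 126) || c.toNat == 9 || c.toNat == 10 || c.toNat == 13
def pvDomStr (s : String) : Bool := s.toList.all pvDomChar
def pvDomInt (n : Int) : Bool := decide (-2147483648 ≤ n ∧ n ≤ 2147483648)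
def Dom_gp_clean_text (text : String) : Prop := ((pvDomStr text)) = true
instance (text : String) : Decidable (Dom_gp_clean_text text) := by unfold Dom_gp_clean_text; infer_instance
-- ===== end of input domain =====

-- B replaces kill_from_line's find/rfind index arithmetic by a walk over text.split('\n'):
-- it keeps the lines before the first line containing the keyword and joins them back ('simpler'/alternative decomposition).

-- ===== PORT A =====
def pvKillFromLine (text keyword : String) : String :=
  let i := PySem.Str.find text keyword
  if i ≠ -1 then
    let j := PySem.Str.rfind (PySem.Str.slice text none (some i)) "\n"
    if j ≠ -1 then PySem.Str.slice text none (some j) else ""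
  else text

def gp_clean_text (text : String) : String :=
  let killFromArgs : List String := ["UPDATE: ", "Read the whole thing here.", "Photo image via", "H/T:"]
  let text := killFromArgs.foldl (fun t kw => pvKillFromLine t kw) text
  PySem.Str.replace text "Gateway Pundit" "this newspaper"

-- ===== PORT B =====
-- index of the first line containing kw (the 'for k, line in enumerate(lines): if kw in line' scan)
def pvFirstHit (kw : String) : List String → Option Nat
  | [] => none
  | l :: ls => if PySem.Str.isIn kw l then some 0 else (pvFirstHit kw ls).map (· + 1)

def pvCutLines (text kw : String) : String :=
  match PySem.Str.split? text "\n" with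
  | none => text          -- unreachable: the separator "\n" is never empty
  | some lines =>
    match pvFirstHit kw lines with
    | none => text
    | some k => PySem.Str.join "\n" (lines.take k)

def gp_clean_text_alt (text : String) : String :=
  let text := ["UPDATE: ", "Read the whole thing here.", "Photo image via", "H/T:"].foldl pvCutLines text
  PySem.Str.replace text "Gateway Pundit" "this newspaper"

-- ===== PRECONDITION & SPEC =====
def Spec_gp_clean_text (text : String) (out : String) : Prop := out = gp_clean_text_alt text
instance (text : String) (out : String) : Decidable (Spec_gp_clean_text text out) := by unfold Spec_gp_clean_text; infer_instance

-- ===== CLAIM (what is proved, stated in full; the proofs are below) =====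
def Claim_equal_gp_clean_text : Prop := ∀ (text : String), Dom_gp_clean_text text → Spec_gp_clean_text text (gp_clean_text text)

-- ===== LEMMAS AND PROOFS =====

def pvKillA (s kw : List Char) : List Char :=
  let i := PySem.Chars.find s kw
  if i ≠ -1 then
    let j := PySem.Chars.rfind (PySem.Chars.slice s none (some i)) ['\n']
    if j ≠ -1 then PySem.Chars.slice s none (some j) else []
  else s
def pvFirstHitC (kw : List Char) : List (List Char) → Option Nat
  | [] => none
  | l :: ls => if PySem.Chars.isIn kw l then some 0 else (pvFirstHitC kw ls).map (· + 1)
def pvKillB (s kw : List Char) : List Char :=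
  match pvFirstHitC kw (PySem.Chars.splitOn s ['\n']) with
  | none => s
  | some k => PySem.Chars.join ['\n'] ((PySem.Chars.splitOn s ['\n']).take k)

theorem pvKillFromLine_toList (t kw : String) :
    (pvKillFromLine t kw).toList = pvKillA t.toList kw.toList := by
  simp only [pvKillFromLine, pvKillA, PySem.Str.find_eq, PySem.Str.rfind_eq,
    PySem.Str.toList_slice]
  split_ifs with h1 h2 <;> simp_all [PySem.Str.toList_slice]

theorem pvFirstHit_eq (kw : String) (L : List (List Char)) :
    pvFirstHit kw (L.map String.ofList) = pvFirstHitC kw.toList L := by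
  induction L with
  | nil => rfl
  | cons l ls ih =>
    simp only [List.map_cons, pvFirstHit, pvFirstHitC, PySem.Str.isIn_eq, String.toList_ofList, ih]

theorem pvCutLines_toList (t kw : String) :
    (pvCutLines t kw).toList = pvKillB t.toList kw.toList := by
  unfold pvCutLines pvKillB
  have hs : PySem.Str.split? t "\n" = some ((PySem.Chars.splitOn t.toList ['\n']).map String.ofList) := by
    simp [PySem.Str.split?, PySem.Chars.split?]
  rw [hs]
  simp only []
  rw [pvFirstHit_eq]
  cases pvFirstHitC kw.toList (PySem.Chars.splitOn t.toList ['\n']) with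
  | none => rfl
  | some k =>
    simp only [PySem.Str.toList_join, ← List.map_take, List.map_map]
    congr 1
    simp [Function.comp_def]

theorem pvSplitGo0 (sep l cur : List Char) (acc : List (List Char)) :
    PySem.Chars.splitOn.go sep 0 l cur acc = ((cur.reverse ++ l) :: acc).reverse := by
  rw [PySem.Chars.splitOn.go]

theorem pvSplitGoNilSucc (sep cur : List Char) (f : Nat) (acc : List (List Char)) :
    PySem.Chars.splitOn.go sep (f+1) [] cur acc = (cur.reverse :: acc).reverse := by
  rw [PySem.Chars.splitOn.go]; omega

theorem pvSplitGoConsSucc (sep : List Char) (f : Nat) (c : Char) (rest cur : List Char) (acc : List (List Char)) :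
    PySem.Chars.splitOn.go sep (f+1) (c :: rest) cur acc =
      if sep.isPrefixOf (c :: rest) then PySem.Chars.splitOn.go sep f (List.drop sep.length (c::rest)) [] (cur.reverse :: acc)
      else PySem.Chars.splitOn.go sep f rest (c :: cur) acc := by
  rw [PySem.Chars.splitOn.go]

theorem pvSplitGoAcc : ∀ (fuel : Nat) (l cur : List Char) (acc : List (List Char)),
    PySem.Chars.splitOn.go ['\n'] fuel l cur acc = acc.reverse ++ PySem.Chars.splitOn.go ['\n'] fuel l cur [] := by
  intro fuel
  induction fuel with
  | zero => intro l cur acc; simp [pvSplitGo0]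
  | succ f ih =>
    intro l cur acc
    cases l with
    | nil => simp [pvSplitGoNilSucc]
    | cons c rest =>
      rw [pvSplitGoConsSucc, pvSplitGoConsSucc]
      split
      · rw [ih _ _ ([cur.reverse]), ih _ _ (cur.reverse :: acc)]
        simp
      · exact ih _ _ acc

theorem pvSplitGoNoNl : ∀ (l : List Char), '\n' ∉ l → ∀ (fuel : Nat) (cur : List Char),
    PySem.Chars.splitOn.go ['\n'] fuel l cur [] = [cur.reverse ++ l] := by
  intro l
  induction l with
  | nil => intro _ fuel cur; cases fuel <;> simp [pvSplitGo0, pvSplitGoNilSucc]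
  | cons c rest ih =>
    intro h fuel cur
    cases fuel with
    | zero => simp [pvSplitGo0]
    | succ f =>
      rw [pvSplitGoConsSucc]
      have hc : c ≠ '\n' := by simp at h; tauto
      have : (['\n'].isPrefixOf (c :: rest)) = false := by
        simp [List.isPrefixOf]; exact fun h => hc h.symm
      rw [this, if_neg (by simp)]
      rw [ih (by simp at h; tauto) f (c :: cur)]
      simp

theorem pvSplitGoFuel : ∀ (l : List Char) (f1 f2 : Nat) (cur : List Char), l.length ≤ f1 → l.length ≤ f2 →
    PySem.Chars.splitOn.go ['\n'] f1 l cur [] = PySem.Chars.splitOn.go ['\n'] f2 l cur [] := by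
  intro l
  induction l with
  | nil => intro f1 f2 cur _ _; cases f1 <;> cases f2 <;> simp [pvSplitGo0, pvSplitGoNilSucc]
  | cons c rest ih =>
    intro f1 f2 cur h1 h2
    cases f1 with
    | zero => simp at h1
    | succ g1 =>
      cases f2 with
      | zero => simp at h2
      | succ g2 =>
        rw [pvSplitGoConsSucc, pvSplitGoConsSucc]
        split
        · rw [pvSplitGoAcc g1, pvSplitGoAcc g2]
          simp only [List.length_cons, List.length_nil, List.drop_succ_cons, List.drop_zero]
          rw [ih g1 g2 [] (by simp at h1 ⊢; omega) (by simp at h2 ⊢; omega)]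
        · exact ih g1 g2 (c :: cur) (by simp at h1 ⊢; omega) (by simp at h2 ⊢; omega)

theorem pvSplitNoNl (s : List Char) (h : '\n' ∉ s) : PySem.Chars.splitOn s ['\n'] = [s] := by
  show PySem.Chars.splitOn.go ['\n'] (s.length + 1) s [] [] = [s]
  rw [pvSplitGoNoNl s h]; simp

theorem pvSplitConsAux : ∀ (a : List Char), '\n' ∉ a → ∀ (b : List Char) (fuel : Nat) (cur : List Char),
    (a ++ '\n' :: b).length ≤ fuel →
    PySem.Chars.splitOn.go ['\n'] fuel (a ++ '\n' :: b) cur []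
      = (cur.reverse ++ a) :: PySem.Chars.splitOn b ['\n'] := by
  intro a
  induction a with
  | nil =>
    intro _ b fuel cur hf
    cases fuel with
    | zero => simp at hf
    | succ f =>
      simp only [List.nil_append]
      rw [pvSplitGoConsSucc]
      have hp : (['\n'].isPrefixOf ('\n' :: b)) = true := by simp [List.isPrefixOf]
      rw [hp, if_pos rfl]
      simp only [List.length_cons, List.length_nil, List.drop_succ_cons, List.drop_zero]
      rw [pvSplitGoAcc]
      simp only [List.reverse_cons, List.reverse_nil, List.nil_append, List.append_nil]
      rw [pvSplitGoFuel b f (b.length + 1) [] (by simp at hf; omega) (by omega)]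
      rfl
  | cons c a' ih =>
    intro h b fuel cur hf
    cases fuel with
    | zero => simp at hf
    | succ f =>
      simp only [List.cons_append]
      rw [pvSplitGoConsSucc]
      have hc : c ≠ '\n' := fun hh => h (hh ▸ List.mem_cons_self ..)
      have : (['\n'].isPrefixOf (c :: (a' ++ '\n' :: b))) = false := by
        simp [List.isPrefixOf]; exact fun hh => hc hh.symm
      rw [this, if_neg (by simp)]
      rw [ih (fun hm => h (List.mem_cons_of_mem _ hm)) b f (c :: cur) (by simp at hf ⊢; omega)]
      simp

theorem pvSplitCons (a b : List Char) (hna : '\n' ∉ a) :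
    PySem.Chars.splitOn (a ++ '\n' :: b) ['\n'] = a :: PySem.Chars.splitOn b ['\n'] := by
  show PySem.Chars.splitOn.go ['\n'] ((a ++ '\n' :: b).length + 1) (a ++ '\n' :: b) [] [] = _
  rw [pvSplitConsAux a hna b _ [] (by omega)]; simp

theorem pvDecomp (s : List Char) : '\n' ∉ s ∨ ∃ a b, s = a ++ '\n' :: b ∧ '\n' ∉ a := by
  induction s with
  | nil => left; simp
  | cons c t ih =>
    by_cases hc : c = '\n'
    · right; exact ⟨[], t, by simp [hc], by simp⟩
    · rcases ih with h | ⟨a, b, rfl, hna⟩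
      · left; simp; exact ⟨fun h' => hc h'.symm, h⟩
      · right; exact ⟨c :: a, b, rfl, by simp; exact ⟨fun h' => hc h'.symm, hna⟩⟩

theorem pvFindGoNil (kw : List Char) (k : Nat) (h : kw ≠ []) : PySem.Chars.find.go kw [] k = -1 := by
  rw [PySem.Chars.find.go]; simp [List.isEmpty_iff, h]
theorem pvFindGoCons (kw : List Char) (c : Char) (t : List Char) (k : Nat) :
    PySem.Chars.find.go kw (c :: t) k
      = if kw.isPrefixOf (c :: t) then (k : Int) else PySem.Chars.find.go kw t (k + 1) := by
  rw [PySem.Chars.find.go]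

theorem pvFindGoBounds (kw : List Char) (hne : kw ≠ []) :
    ∀ (s : List Char) (k : Nat), PySem.Chars.find.go kw s k = -1 ∨ (k : Int) ≤ PySem.Chars.find.go kw s k := by
  intro s
  induction s with
  | nil => intro k; left; exact pvFindGoNil _ _ hne
  | cons c t ih =>
    intro k
    rw [pvFindGoCons]
    by_cases hp : kw.isPrefixOf (c :: t) = true
    · right; rw [if_pos hp]
    · rw [if_neg hp]
      rcases ih (k+1) with h | h
      · left; exact h
      · right; push_cast at h ⊢; omega

theorem pvFindGoShift (kw : List Char) (hne : kw ≠ []) :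
    ∀ (s : List Char) (k : Nat), PySem.Chars.find.go kw s k
      = if PySem.Chars.find.go kw s 0 = -1 then -1 else (k : Int) + PySem.Chars.find.go kw s 0 := by
  intro s
  induction s with
  | nil => intro k; rw [pvFindGoNil _ _ hne, pvFindGoNil _ _ hne]; simp
  | cons c t ih =>
    intro k
    rw [pvFindGoCons, pvFindGoCons kw c t 0]
    by_cases hp : kw.isPrefixOf (c :: t) = true
    · rw [if_pos hp, if_pos hp, if_neg (by omega)]
      omega
    · rw [if_neg hp, if_neg hp]
      rw [ih (k+1), ih 1]
      by_cases h0 : PySem.Chars.find.go kw t 0 = -1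
      · simp [h0]
      · rcases pvFindGoBounds kw hne t 0 with hb | hb
        · exact absurd hb h0
        · rw [if_neg h0, if_neg h0, if_neg (by omega)]
          push_cast; omega

theorem pvPrefixStraddle (kw a b : List Char) (hnl : '\n' ∉ kw) :
    kw <+: a ++ '\n' :: b ↔ kw <+: a := by
  constructor
  · intro h
    by_cases hlen : kw.length ≤ a.length
    · have htake : kw <+: (a ++ '\n' :: b).take kw.length := List.prefix_take_iff.mpr ⟨h, le_rfl⟩
      rw [List.take_append_of_le_length hlen] at htake
      exact htake.trans (List.take_prefix _ _)
    · exfalso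
      have hidx : a.length < kw.length := by omega
      obtain ⟨t, ht⟩ := h
      have hget : (a ++ '\n' :: b)[a.length]'(by simp) = '\n' := by
        rw [List.getElem_append_right le_rfl]; simp
      have hkget : kw[a.length]'hidx = '\n' := by
        have h2 : (kw ++ t)[a.length]'(by simp; omega) = kw[a.length]'hidx :=
          List.getElem_append_left hidx
        rw [← h2]
        simp only [ht]
        exact hget
      exact hnl (hkget ▸ List.getElem_mem hidx)
  · intro h; exact h.trans (List.prefix_append _ _)

theorem pvFindGoAppend (kw : List Char) (hnl : '\n' ∉ kw) (hne : kw ≠ []) :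
    ∀ (a : List Char) (b : List Char) (k : Nat), '\n' ∉ a →
      PySem.Chars.find.go kw (a ++ '\n' :: b) k
        = if PySem.Chars.find.go kw a k = -1 then PySem.Chars.find.go kw b (k + a.length + 1)
          else PySem.Chars.find.go kw a k := by
  intro a
  induction a with
  | nil =>
    intro b k _
    simp only [List.nil_append]
    rw [pvFindGoCons, pvFindGoNil _ _ hne]
    have : kw.isPrefixOf ('\n' :: b) = false := by
      rw [Bool.eq_false_iff]
      intro hp
      rw [List.isPrefixOf_iff_prefix] at hp
      have := (pvPrefixStraddle kw [] b hnl).mp (by simpa using hp)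
      simp [List.prefix_nil] at this
      exact hne this
    rw [this]
    simp
  | cons c a' ih =>
    intro b k h
    have hc : c ≠ '\n' := fun hh => h (hh ▸ List.mem_cons_self ..)
    have ha' : '\n' ∉ a' := fun hm => h (List.mem_cons_of_mem _ hm)
    simp only [List.cons_append]
    rw [pvFindGoCons, pvFindGoCons kw c a' k]
    have hiff : kw.isPrefixOf (c :: (a' ++ '\n' :: b)) = true ↔ kw.isPrefixOf (c :: a') = true := by
      rw [List.isPrefixOf_iff_prefix, List.isPrefixOf_iff_prefix]
      have := pvPrefixStraddle kw (c :: a') b hnl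
      simpa using this
    by_cases hp : kw.isPrefixOf (c :: a') = true
    · rw [if_pos (hiff.mpr hp), if_pos hp, if_neg (by omega)]
    · rw [if_neg (fun hh => hp (hiff.mp hh)), if_neg hp]
      rw [ih b (k+1) ha']
      have harg : k + 1 + a'.length + 1 = k + (a'.length + 1) + 1 := by omega
      rw [List.length_cons, harg]

theorem pvRfindGoZero (s : List Char) :
    PySem.Chars.rfind.go s ['\n'] 0 = if ['\n'].isPrefixOf s then (0:Int) else -1 := by
  rw [PySem.Chars.rfind.go]
theorem pvRfindGoSucc (s : List Char) (j : Nat) :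
    PySem.Chars.rfind.go s ['\n'] (j+1)
      = if ['\n'].isPrefixOf (s.drop (j+1)) then ((j:Int)+1) else PySem.Chars.rfind.go s ['\n'] j := by
  rw [PySem.Chars.rfind.go]; push_cast; ring_nf

theorem pvNlPrefix (l : List Char) : ['\n'].isPrefixOf l = true ↔ l.head? = some '\n' := by
  cases l with
  | nil => simp [List.isPrefixOf]
  | cons c t =>
    simp only [List.isPrefixOf, Bool.and_true, List.head?_cons, Option.some.injEq, beq_iff_eq]
    exact ⟨fun h => h.symm, fun h => h.symm⟩

theorem pvRfindGoBounds (l : List Char) : ∀ (j : Nat),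
    PySem.Chars.rfind.go l ['\n'] j = -1 ∨ (0 ≤ PySem.Chars.rfind.go l ['\n'] j ∧ PySem.Chars.rfind.go l ['\n'] j ≤ (j : Int)) := by
  intro j
  induction j with
  | zero => rw [pvRfindGoZero]; split <;> simp
  | succ j ih =>
    rw [pvRfindGoSucc]
    split
    · right; constructor <;> push_cast <;> omega
    · rcases ih with h | ⟨h1, h2⟩
      · left; exact h
      · right; refine ⟨h1, ?_⟩; push_cast; omega

theorem pvRfindGoNegOneIff (l : List Char) : ∀ (j : Nat), j ≤ l.length →
    (PySem.Chars.rfind.go l ['\n'] j = -1 ↔ '\n' ∉ l.take (j + 1)) := by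
  intro j
  induction j with
  | zero =>
    intro _
    rw [pvRfindGoZero]
    cases l with
    | nil => simp [List.isPrefixOf]
    | cons c t =>
      by_cases hc : c = '\n'
      · subst hc; simp [List.isPrefixOf]
      · simp only [pvNlPrefix, List.head?_cons, List.take_succ_cons, List.take_zero,
          List.mem_singleton]
        constructor
        · intro _ hx; exact hc hx.symm
        · intro _
          rw [if_neg (by simp; exact fun h => hc h)]
  | succ j ih =>
    intro hj
    rw [pvRfindGoSucc]
    by_cases hp : ['\n'].isPrefixOf (l.drop (j+1)) = true
    · rw [if_pos hp]
      rw [pvNlPrefix, List.head?_drop] at hp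
      have hjl : j + 1 < l.length := by
        by_contra hh
        rw [List.getElem?_eq_none (by omega)] at hp
        simp at hp
      have hget : l[j+1]'hjl = '\n' := by
        rw [List.getElem?_eq_getElem hjl] at hp; simpa using hp
      have hmem : '\n' ∈ l.take (j+1+1) :=
        hget ▸ List.mem_take_iff_getElem.mpr ⟨j+1, by omega, rfl⟩
      constructor
      · intro h; exfalso; omega
      · intro h; exact absurd hmem h
    · rw [if_neg (by simpa using hp)]
      rw [ih (by omega)]
      by_cases hjl : j + 1 < l.length
      · have hne : l[j+1]'hjl ≠ '\n' := by
          intro hx; apply hp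
          rw [pvNlPrefix, List.head?_drop, List.getElem?_eq_getElem hjl, hx]
        constructor
        · intro h hx
          exact h (by rw [List.take_add_one] at hx
                      rcases List.mem_append.mp hx with h1 | h2
                      · exact h1
                      · exfalso; apply hne
                        rw [List.getElem?_eq_getElem hjl] at h2; simp at h2; exact h2.symm)
        · intro h hx
          exact h (by rw [List.take_add_one]; exact List.mem_append_left _ hx)
      · rw [List.take_of_length_le (by omega), List.take_of_length_le (by omega)]

theorem pvDropPast (a t : List Char) (j : Nat) :
    (a ++ '\n' :: t).drop (a.length + 1 + j) = t.drop j := by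
  have h1 : a ++ '\n' :: t = (a ++ ['\n']) ++ t := by simp
  rw [h1]
  have h2 : a.length + 1 + j = (a ++ ['\n']).length + j := by simp
  rw [h2, List.drop_append]
  simp

theorem pvRfindGoBase (a t : List Char) :
    PySem.Chars.rfind.go (a ++ '\n' :: t) ['\n'] a.length = (a.length : Int) := by
  cases ha : a.length with
  | zero =>
    rw [pvRfindGoZero]
    have : a = [] := List.eq_nil_of_length_eq_zero ha
    subst this
    rw [if_pos (by rw [pvNlPrefix]; simp)]
    simp
  | succ m =>
    rw [pvRfindGoSucc]
    have heq : m + 1 = a.length := ha.symm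
    have hd : (a ++ '\n' :: t).drop (m+1) = '\n' :: t := by
      rw [heq]
      have := List.drop_left (l₁ := a) (l₂ := '\n' :: t)
      simpa using this
    rw [hd, if_pos (by rw [pvNlPrefix]; simp)]
    push_cast [← heq]; ring

theorem pvRfindGoShift (a t : List Char) : ∀ (j : Nat),
    PySem.Chars.rfind.go (a ++ '\n' :: t) ['\n'] (a.length + 1 + j)
      = if PySem.Chars.rfind.go t ['\n'] j = -1 then (a.length : Int)
        else (a.length : Int) + 1 + PySem.Chars.rfind.go t ['\n'] j := by
  intro j
  induction j with
  | zero =>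
    have h1 : a.length + 1 + 0 = a.length + 1 := rfl
    rw [h1, pvRfindGoSucc, pvRfindGoZero]
    have hd : (a ++ '\n' :: t).drop (a.length + 1) = t := by
      have := pvDropPast a t 0
      simpa using this
    rw [hd]
    by_cases hp : ['\n'].isPrefixOf t = true
    · rw [if_pos hp, if_pos hp, if_neg (by omega)]
      ring
    · rw [if_neg hp, if_neg hp, if_pos rfl, pvRfindGoBase]
  | succ j ih =>
    have h1 : a.length + 1 + (j + 1) = (a.length + 1 + j) + 1 := by omega
    rw [h1, pvRfindGoSucc]
    have hd : (a ++ '\n' :: t).drop (a.length + 1 + j + 1) = t.drop (j+1) := by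
      have h3 : a.length + 1 + j + 1 = a.length + 1 + (j + 1) := by omega
      rw [h3, pvDropPast]
    rw [hd, pvRfindGoSucc t j]
    by_cases hp : ['\n'].isPrefixOf (t.drop (j+1)) = true
    · rw [if_pos hp, if_pos hp, if_neg (by omega)]
      push_cast; ring
    · rw [if_neg hp, if_neg hp, ih]

-- stand-ins for proved lemmas

-- small helpers
theorem pvJoinSingle (sep x : List Char) : PySem.Chars.join sep [x] = x := by
  unfold PySem.Chars.join; simp [List.intercalate]
theorem pvJoinCons (sep x : List Char) (l : List (List Char)) (h : l ≠ []) :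
    PySem.Chars.join sep (x :: l) = x ++ sep ++ PySem.Chars.join sep l := by
  cases l with
  | nil => exact absurd rfl h
  | cons y ys => unfold PySem.Chars.join; simp [List.intercalate, List.intersperse]
theorem pvTakePast (a t : List Char) (m : Nat) :
    (a ++ '\n' :: t).take (a.length + 1 + m) = a ++ '\n' :: t.take m := by
  have h1 : a ++ '\n' :: t = (a ++ ['\n']) ++ t := by simp
  have h2 : a.length + 1 + m = (a ++ ['\n']).length + m := by simp
  rw [h1, h2, List.take_append, List.take_of_length_le (by simp)]
  simp
theorem pvRfindTotal (l : List Char) (h : '\n' ∉ l) : PySem.Chars.rfind l ['\n'] = -1 :=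
  (pvRfindGoNegOneIff l l.length le_rfl).mpr (fun hm => h (List.take_subset _ _ hm))
theorem pvRfindNegIff (l : List Char) : PySem.Chars.rfind l ['\n'] = -1 ↔ '\n' ∉ l := by
  have := pvRfindGoNegOneIff l l.length le_rfl
  rwa [List.take_of_length_le (by omega)] at this

theorem pvCharsSliceTo (s : List Char) {i : Int} (h : 0 ≤ i) :
    PySem.Chars.slice s none (some i) = s.take i.toNat := PySem.List.slice_to s h

theorem pvMain (kw : List Char) (hnl : '\n' ∉ kw) (hne : kw ≠ []) : ∀ (n : Nat) (s : List Char), s.length ≤ n →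
    pvKillA s kw = pvKillB s kw ∧
    (pvFirstHitC kw (PySem.Chars.splitOn s ['\n']) = none ↔ PySem.Chars.find s kw = -1) ∧
    (pvFirstHitC kw (PySem.Chars.splitOn s ['\n']) = some 0 ↔
      (PySem.Chars.find s kw ≠ -1 ∧ '\n' ∉ s.take (PySem.Chars.find s kw).toNat)) := by
  intro n
  induction n with
  | zero =>
    intro s hs
    have : s = [] := List.eq_nil_of_length_eq_zero (by omega)
    subst this
    have hfind : PySem.Chars.find [] kw = -1 :=
      (PySem.Chars.find_eq_neg_one_iff [] kw).mpr (by
        intro hinf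
        exact hne (List.eq_nil_of_infix_nil hinf))
    have hisin : PySem.Chars.isIn kw [] = false := by
      rw [PySem.Chars.isIn_eq_false_iff]
      intro hinf; exact hne (List.eq_nil_of_infix_nil hinf)
    refine ⟨?_, ?_, ?_⟩
    · unfold pvKillA pvKillB
      rw [pvSplitNoNl [] (by simp)]
      simp [pvFirstHitC, hfind, hisin]
    · rw [pvSplitNoNl [] (by simp)]
      simp [pvFirstHitC, hfind, hisin]
    · rw [pvSplitNoNl [] (by simp)]
      simp [pvFirstHitC, hfind, hisin]
  | succ n ih =>
    intro s hs
    rcases pvDecomp s with hno | ⟨a, b, rfl, hna⟩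
    · -- single line
      have hsplit := pvSplitNoNl s hno
      by_cases hin : PySem.Chars.isIn kw s = true
      · have hinf : kw <:+: s := (PySem.Chars.isIn_iff_infix kw s).mp hin
        have hfne : PySem.Chars.find s kw ≠ -1 := (PySem.Chars.find_ne_neg_one_iff s kw).mpr hinf
        have hf0 : 0 ≤ PySem.Chars.find s kw := (PySem.Chars.find_nonneg_iff s kw).mpr hinf
        have hnotake : '\n' ∉ s.take (PySem.Chars.find s kw).toNat :=
          fun hm => hno (List.take_subset _ _ hm)
        refine ⟨?_, ?_, ?_⟩
        · unfold pvKillA pvKillB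
          rw [hsplit]
          simp only [pvFirstHitC, hin, if_pos]
          rw [if_pos hfne]
          rw [pvCharsSliceTo s hf0, pvRfindTotal _ hnotake]
          simp
        · rw [hsplit]; simp [pvFirstHitC, hin, hfne]
        · rw [hsplit]; simp [pvFirstHitC, hin, hfne, hnotake]
      · have hninf : ¬ kw <:+: s := fun h => (by simp [hin] : ¬ _) ((PySem.Chars.isIn_iff_infix kw s).mpr h)
        have hfeq : PySem.Chars.find s kw = -1 := (PySem.Chars.find_eq_neg_one_iff s kw).mpr hninf
        refine ⟨?_, ?_, ?_⟩
        · unfold pvKillA pvKillB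
          rw [hsplit]
          simp [pvFirstHitC, hin, hfeq]
        · rw [hsplit]; simp [pvFirstHitC, hin, hfeq]
        · rw [hsplit]; simp [pvFirstHitC, hin, hfeq]
    · -- s = a ++ '\n' :: b
      have hblen : b.length ≤ n := by simp at hs; omega
      obtain ⟨IH1, IH2, IH3⟩ := ih b hblen
      have hsplit := pvSplitCons a b hna
      set L := PySem.Chars.splitOn b ['\n'] with hL
      have hfind : PySem.Chars.find (a ++ '\n' :: b) kw
          = if PySem.Chars.find a kw = -1 then
              (if PySem.Chars.find b kw = -1 then -1 else ((a.length : Int) + 1) + PySem.Chars.find b kw)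
            else PySem.Chars.find a kw := by
        unfold PySem.Chars.find
        rw [pvFindGoAppend kw hnl hne a b 0 hna, pvFindGoShift kw hne b (0 + a.length + 1)]
        split_ifs <;> first | rfl | (push_cast; ring)
      by_cases hin : PySem.Chars.isIn kw a = true
      · -- keyword in the first line
        have hinf : kw <:+: a := (PySem.Chars.isIn_iff_infix kw a).mp hin
        have hfa : PySem.Chars.find a kw ≠ -1 := (PySem.Chars.find_ne_neg_one_iff a kw).mpr hinf
        have hfa0 : 0 ≤ PySem.Chars.find a kw := (PySem.Chars.find_nonneg_iff a kw).mpr hinf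
        have hfle : PySem.Chars.find a kw ≤ (a.length : Int) := PySem.Chars.find_le_length a kw
        have hfs : PySem.Chars.find (a ++ '\n' :: b) kw = PySem.Chars.find a kw := by
          rw [hfind, if_neg hfa]
        have htake : (a ++ '\n' :: b).take (PySem.Chars.find a kw).toNat
            = a.take (PySem.Chars.find a kw).toNat :=
          List.take_append_of_le_length (by omega)
        have hnotake : '\n' ∉ (a ++ '\n' :: b).take (PySem.Chars.find (a ++ '\n' :: b) kw).toNat := by
          rw [hfs, htake]
          exact fun hm => hna (List.take_subset _ _ hm)
        refine ⟨?_, ?_, ?_⟩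
        · unfold pvKillA pvKillB
          rw [hsplit]
          simp only [pvFirstHitC, hin, if_pos]
          rw [if_pos (hfs ▸ hfa)]
          rw [pvCharsSliceTo _ (hfs ▸ hfa0 : (0:Int) ≤ PySem.Chars.find (a ++ '\n' :: b) kw),
            pvRfindTotal _ hnotake]
          simp
        · rw [hsplit]
          simp only [pvFirstHitC, hin, if_pos]
          constructor
          · intro h; exact absurd h (by simp)
          · intro h; exact absurd h (hfs ▸ hfa)
        · rw [hsplit]
          simp only [pvFirstHitC, hin, if_pos, true_iff]
          exact ⟨hfs ▸ hfa, hnotake⟩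
      · -- keyword not in the first line
        have hninf : ¬ kw <:+: a := fun h => (by simp [hin] : ¬ _) ((PySem.Chars.isIn_iff_infix kw a).mpr h)
        have hfa : PySem.Chars.find a kw = -1 := (PySem.Chars.find_eq_neg_one_iff a kw).mpr hninf
        have hfs : PySem.Chars.find (a ++ '\n' :: b) kw
            = if PySem.Chars.find b kw = -1 then -1 else ((a.length : Int) + 1) + PySem.Chars.find b kw := by
          rw [hfind, if_pos hfa]
        rcases eq_or_ne (PySem.Chars.find b kw) (-1) with hfb | hfb
        · -- keyword nowhere
          have hfs' : PySem.Chars.find (a ++ '\n' :: b) kw = -1 := by rw [hfs, if_pos hfb]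
          have hLnone : pvFirstHitC kw L = none := IH2.mpr hfb
          refine ⟨?_, ?_, ?_⟩
          · unfold pvKillA pvKillB
            rw [hsplit]
            simp [pvFirstHitC, hin, hLnone, hfs']
          · rw [hsplit]; simp [pvFirstHitC, hin, hLnone, hfs']
          · rw [hsplit]; simp [pvFirstHitC, hin, hLnone, hfs']
        · -- keyword in b
          have hfb0 : 0 ≤ PySem.Chars.find b kw :=
            (PySem.Chars.find_nonneg_iff b kw).mpr ((PySem.Chars.find_ne_neg_one_iff b kw).mp hfb)
          have hfs' : PySem.Chars.find (a ++ '\n' :: b) kw = ((a.length : Int) + 1) + PySem.Chars.find b kw := by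
            rw [hfs, if_neg hfb]
          have hfsne : PySem.Chars.find (a ++ '\n' :: b) kw ≠ -1 := by rw [hfs']; omega
          obtain ⟨k', hk'⟩ : ∃ k', pvFirstHitC kw L = some k' := by
            cases hcase : pvFirstHitC kw L with
            | none => exact absurd (IH2.mp hcase) hfb
            | some k' => exact ⟨k', rfl⟩
          have htoNat : (((a.length : Int) + 1) + PySem.Chars.find b kw).toNat
              = a.length + 1 + (PySem.Chars.find b kw).toNat := by omega
          have htake : (a ++ '\n' :: b).take (PySem.Chars.find (a ++ '\n' :: b) kw).toNat
              = a ++ '\n' :: b.take (PySem.Chars.find b kw).toNat := by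
            rw [hfs', htoNat, pvTakePast]
          have hmem : '\n' ∈ (a ++ '\n' :: b).take (PySem.Chars.find (a ++ '\n' :: b) kw).toNat := by
            rw [htake]; simp
          set t := b.take (PySem.Chars.find b kw).toNat with ht
          have hrs : PySem.Chars.rfind (a ++ '\n' :: t) ['\n']
              = if PySem.Chars.rfind t ['\n'] = -1 then (a.length : Int)
                else (a.length : Int) + 1 + PySem.Chars.rfind t ['\n'] := by
            show PySem.Chars.rfind.go (a ++ '\n' :: t) ['\n'] ((a ++ '\n' :: t).length) = _
            have hlen : (a ++ '\n' :: t).length = a.length + 1 + t.length := by simp; omega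
            rw [hlen, pvRfindGoShift a t t.length]
            rfl
          have hcouple : PySem.Chars.rfind t ['\n'] = -1 ↔ pvFirstHitC kw L = some 0 := by
            rw [pvRfindNegIff, IH3, ht]
            exact ⟨fun h => ⟨hfb, h⟩, fun h => h.2⟩
          have hKB : pvKillB b kw = PySem.Chars.join ['\n'] (L.take k') := by
            unfold pvKillB; rw [← hL, hk']
          have hKA : pvKillA b kw
              = if PySem.Chars.rfind t ['\n'] ≠ -1
                then PySem.Chars.slice b none (some (PySem.Chars.rfind t ['\n'])) else [] := by
            unfold pvKillA
            rw [if_pos hfb]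
            show (if PySem.Chars.rfind (PySem.Chars.slice b none (some (PySem.Chars.find b kw))) ['\n'] ≠ -1
              then _ else _) = _
            rw [show PySem.Chars.slice b none (some (PySem.Chars.find b kw)) = t from pvCharsSliceTo _ hfb0]
          refine ⟨?_, ?_, ?_⟩
          · unfold pvKillA pvKillB
            rw [hsplit]
            simp only [pvFirstHitC, hin, Bool.false_eq_true, if_false, hk', Option.map_some]
            rw [if_pos hfsne]
            rw [show PySem.Chars.slice (a ++ '\n' :: b) none (some (PySem.Chars.find (a ++ '\n' :: b) kw))
                = (a ++ '\n' :: b).take (PySem.Chars.find (a ++ '\n' :: b) kw).toNat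
              from pvCharsSliceTo _ (by rw [hfs']; omega)]
            rw [htake, hrs]
            rcases eq_or_ne (PySem.Chars.rfind t ['\n']) (-1) with hr | hr
            · -- cut falls on the first line of b: result is a
              have hk0 : k' = 0 := by
                have h0 := hcouple.mp hr
                rw [hk'] at h0; injection h0
              rw [if_pos hr, if_pos (by omega : ((a.length : Int)) ≠ -1)]
              rw [show PySem.Chars.slice (a ++ '\n' :: b) none (some (a.length : Int))
                  = (a ++ '\n' :: b).take ((a.length : Int)).toNat
                from pvCharsSliceTo _ (by omega)]
              rw [Int.toNat_natCast, List.take_append_of_le_length le_rfl, List.take_of_length_le le_rfl]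
              rw [hk0, List.take_succ_cons, List.take_zero, pvJoinSingle]
            · -- cut falls deeper in b: peel off the first line
              have hk0 : k' ≠ 0 := by
                intro h0
                exact hr (hcouple.mpr (h0 ▸ hk'))
              have hr0 : 0 ≤ PySem.Chars.rfind t ['\n'] := by
                rcases pvRfindGoBounds t t.length with h | ⟨h1, -⟩
                · exact absurd h hr
                · exact h1
              rw [if_neg hr, if_pos (by omega : ((a.length : Int) + 1 + PySem.Chars.rfind t ['\n']) ≠ -1)]
              have htoNat2 : ((a.length : Int) + 1 + PySem.Chars.rfind t ['\n']).toNat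
                  = a.length + 1 + (PySem.Chars.rfind t ['\n']).toNat := by omega
              rw [show PySem.Chars.slice (a ++ '\n' :: b) none (some ((a.length : Int) + 1 + PySem.Chars.rfind t ['\n']))
                  = (a ++ '\n' :: b).take (((a.length : Int) + 1 + PySem.Chars.rfind t ['\n'])).toNat
                from pvCharsSliceTo _ (by omega)]
              rw [htoNat2, pvTakePast]
              have hLne : L ≠ [] := by
                intro h0; rw [h0] at hk'; simp [pvFirstHitC] at hk'
              have htkne : L.take k' ≠ [] := by
                rw [Ne, List.take_eq_nil_iff]
                push Not
                exact ⟨hk0, hLne⟩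
              rw [List.take_succ_cons, pvJoinCons _ _ _ htkne]
              have htail : PySem.Chars.join ['\n'] (L.take k') = b.take (PySem.Chars.rfind t ['\n']).toNat := by
                rw [← hKB, ← IH1, hKA, if_pos hr]
                exact pvCharsSliceTo _ hr0
              rw [htail]
              simp
          · rw [hsplit]
            simp [pvFirstHitC, hin, hk', hfsne]
          · rw [hsplit]
            simp only [pvFirstHitC, hin, Bool.false_eq_true, if_false, hk', Option.map_some]
            constructor
            · intro h; injection h with h; omega
            · rintro ⟨-, hno'⟩
              exact absurd hmem hno'


theorem pvKillEq (t kw : String) (hnl : '\n' ∉ kw.toList) (hne : kw.toList ≠ []) :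
    pvKillFromLine t kw = pvCutLines t kw := by
  rw [← String.toList_inj, pvKillFromLine_toList, pvCutLines_toList]
  exact (pvMain kw.toList hnl hne t.toList.length t.toList le_rfl).1

-- ===== VERDICT (by name: the statement is the Claim_ definition above) =====
theorem gp_clean_text_spec : Claim_equal_gp_clean_text := by
  intro text _
  unfold Spec_gp_clean_text gp_clean_text gp_clean_text_alt
  simp only [List.foldl]
  rw [pvKillEq _ _ (by decide) (by decide), pvKillEq _ _ (by decide) (by decide),
      pvKillEq _ _ (by decide) (by decide), pvKillEq _ _ (by decide) (by decide)]
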